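-- pv_equiv track=rewrite | github.com/prplz/aoc-2018-python | 16/16.py | process
-- ===== SOURCE A (Python) =====
-- def process(opcode, args, registers):
--     def set_register(index, value):
--         return tuple(
--             value if i == index else r for i, r in enumerate(registers)
--         )
--
--     a, b, c = args
--     if opcode == 'addr':
--         return set_register(c, registers[a] + registers[b])
--     if opcode == 'addi':
--         return set_register(c, registers[a] + b)
--     if opcode == 'mulr':
--         return set_register(c, registers[a] * registers[b])
--     if opcode == 'muli':
--         return set_register(c, registers[a] * b)
--     if opcode == 'banr':
--         return set_register(c, registers[a] & registers[b])
--     if opcode == 'bani':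
--         return set_register(c, registers[a] & b)
--     if opcode == 'borr':
--         return set_register(c, registers[a] | registers[b])
--     if opcode == 'bori':
--         return set_register(c, registers[a] | b)
--     if opcode == 'setr':
--         return set_register(c, registers[a])
--     if opcode == 'seti':
--         return set_register(c, a)
--     if opcode == 'gtir':
--         return set_register(c, int(a > registers[b]))
--     if opcode == 'gtri':
--         return set_register(c, int(registers[a] > b))
--     if opcode == 'gtrr':
--         return set_register(c, int(registers[a] > registers[b]))
--     if opcode == 'eqir':
--         return set_register(c, int(a == registers[b]))
--     if opcode == 'eqri':
--         return set_register(c, int(registers[a] == b))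
--     if opcode == 'eqrr':
--         return set_register(c, int(registers[a] == registers[b]))
-- ===== SOURCE B (Python) =====
-- def _arith(op, x, y):
--     if op == 'add':
--         return x + y
--     if op == 'mul':
--         return x * y
--     if op == 'ban':
--         return x & y
--     return x | y  # 'bor'
--
--
-- def _set(registers, index, value):
--     return tuple(value if i == index else r for i, r in enumerate(registers))
--
--
-- def process(opcode, args, registers):
--     a, b, c = args
--     if opcode == 'seti':
--         return _set(registers, c, a)
--     if opcode == 'setr':
--         return _set(registers, c, registers[a])
--     op2, mode2 = opcode[:2], opcode[2:]
--     if op2 in ('gt', 'eq') and mode2 in ('ir', 'ri', 'rr'):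
--         x = a if mode2[0] == 'i' else registers[a]
--         y = b if mode2[1] == 'i' else registers[b]
--         return _set(registers, c, int(x > y) if op2 == 'gt' else int(x == y))
--     op3, mode3 = opcode[:3], opcode[3:]
--     if op3 in ('add', 'mul', 'ban', 'bor') and mode3 in ('r', 'i'):
--         y = registers[b] if mode3 == 'r' else b
--         return _set(registers, c, _arith(op3, registers[a], y))
-- ===== Notes on version B (the rewrite author's own statement) =====
-- stated objective: idiomatic
-- what changed: B decodes each opcode into its base operation and addressing-mode suffix (set; gt/eq with two mode letters; add/mul/ban/bor with one) and dispatches through a small arithmetic helper, instead of A's sixteen flat string-equality branches; Pre_ excludes only the inputs on which A raises IndexError reading registers[a]/registers[b].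
import Mathlib
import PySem

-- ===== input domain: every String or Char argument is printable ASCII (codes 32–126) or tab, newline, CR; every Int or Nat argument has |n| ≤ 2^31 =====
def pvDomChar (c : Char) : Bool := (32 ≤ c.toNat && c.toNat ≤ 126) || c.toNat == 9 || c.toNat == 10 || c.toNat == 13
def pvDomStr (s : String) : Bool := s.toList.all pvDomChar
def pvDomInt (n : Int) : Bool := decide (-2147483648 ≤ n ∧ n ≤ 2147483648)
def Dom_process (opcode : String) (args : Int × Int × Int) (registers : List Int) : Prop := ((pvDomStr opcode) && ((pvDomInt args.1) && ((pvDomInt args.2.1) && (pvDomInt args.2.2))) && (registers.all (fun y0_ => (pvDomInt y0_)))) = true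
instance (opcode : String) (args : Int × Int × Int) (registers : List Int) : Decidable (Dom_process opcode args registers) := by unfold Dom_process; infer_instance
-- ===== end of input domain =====

-- B decodes each opcode into base operation + addressing-mode suffix (instead of
-- sixteen flat string-equality branches); objective: idiomatic, same cost.

-- ===== PORT A =====
-- set_register: tuple(value if i == index else r for i, r in enumerate(registers))
def pvSetRegister (registers : List Int) (index value : Int) : List Int :=
  (PySem.List.enumerate registers).map (fun ir => if ir.1 == index then value else ir.2)

def process (opcode : String) (args : Int × Int × Int) (registers : List Int) : Option (List Int) :=
  let a := args.1; let b := args.2.1; let c := args.2.2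
  if opcode == "addr" then
    (PySem.List.pyGet? registers a).bind fun ra =>
      (PySem.List.pyGet? registers b).map fun rb => pvSetRegister registers c (ra + rb)
  else if opcode == "addi" then
    (PySem.List.pyGet? registers a).map fun ra => pvSetRegister registers c (ra + b)
  else if opcode == "mulr" then
    (PySem.List.pyGet? registers a).bind fun ra =>
      (PySem.List.pyGet? registers b).map fun rb => pvSetRegister registers c (ra * rb)
  else if opcode == "muli" then
    (PySem.List.pyGet? registers a).map fun ra => pvSetRegister registers c (ra * b)
  else if opcode == "banr" then
    (PySem.List.pyGet? registers a).bind fun ra =>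
      (PySem.List.pyGet? registers b).map fun rb => pvSetRegister registers c (PySem.Int.band ra rb)
  else if opcode == "bani" then
    (PySem.List.pyGet? registers a).map fun ra => pvSetRegister registers c (PySem.Int.band ra b)
  else if opcode == "borr" then
    (PySem.List.pyGet? registers a).bind fun ra =>
      (PySem.List.pyGet? registers b).map fun rb => pvSetRegister registers c (PySem.Int.bor ra rb)
  else if opcode == "bori" then
    (PySem.List.pyGet? registers a).map fun ra => pvSetRegister registers c (PySem.Int.bor ra b)
  else if opcode == "setr" then
    (PySem.List.pyGet? registers a).map fun ra => pvSetRegister registers c ra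
  else if opcode == "seti" then
    some (pvSetRegister registers c a)
  else if opcode == "gtir" then
    (PySem.List.pyGet? registers b).map fun rb => pvSetRegister registers c (if a > rb then 1 else 0)
  else if opcode == "gtri" then
    (PySem.List.pyGet? registers a).map fun ra => pvSetRegister registers c (if ra > b then 1 else 0)
  else if opcode == "gtrr" then
    (PySem.List.pyGet? registers a).bind fun ra =>
      (PySem.List.pyGet? registers b).map fun rb => pvSetRegister registers c (if ra > rb then 1 else 0)
  else if opcode == "eqir" then
    (PySem.List.pyGet? registers b).map fun rb => pvSetRegister registers c (if a == rb then 1 else 0)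
  else if opcode == "eqri" then
    (PySem.List.pyGet? registers a).map fun ra => pvSetRegister registers c (if ra == b then 1 else 0)
  else if opcode == "eqrr" then
    (PySem.List.pyGet? registers a).bind fun ra =>
      (PySem.List.pyGet? registers b).map fun rb => pvSetRegister registers c (if ra == rb then 1 else 0)
  else none

-- ===== PORT B =====
-- _arith(op, x, y)
def pvArith (op : String) (x y : Int) : Int :=
  if op == "add" then x + y
  else if op == "mul" then x * y
  else if op == "ban" then PySem.Int.band x y
  else PySem.Int.bor x y

-- _set(registers, index, value): tuple(value if i == index else r for i, r in enumerate(registers))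
def pvSetB (registers : List Int) (index value : Int) : List Int :=
  (PySem.List.enumerate registers).map (fun ir => if ir.1 == index then value else ir.2)

def process_alt (opcode : String) (args : Int × Int × Int) (registers : List Int) : Option (List Int) :=
  let a := args.1; let b := args.2.1; let c := args.2.2
  if opcode == "seti" then some (pvSetB registers c a)
  else if opcode == "setr" then
    (PySem.List.pyGet? registers a).map fun ra => pvSetB registers c ra
  else
    let op2 := PySem.Str.slice opcode (some 0) (some 2)
    let mode2 := PySem.Str.slice opcode (some 2) none
    if (op2 == "gt" || op2 == "eq")
        && (mode2 == "ir" || mode2 == "ri" || mode2 == "rr") then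
      (if PySem.Str.pyGet? mode2 0 == some 'i' then some a
       else PySem.List.pyGet? registers a).bind fun x =>
      (if PySem.Str.pyGet? mode2 1 == some 'i' then some b
       else PySem.List.pyGet? registers b).map fun y =>
      pvSetB registers c
        (if op2 == "gt" then (if x > y then 1 else 0) else (if x == y then 1 else 0))
    else
      let op3 := PySem.Str.slice opcode (some 0) (some 3)
      let mode3 := PySem.Str.slice opcode (some 3) none
      if (op3 == "add" || op3 == "mul" || op3 == "ban" || op3 == "bor")
          && (mode3 == "r" || mode3 == "i") then
        (if mode3 == "r" then PySem.List.pyGet? registers b else some b).bind fun y =>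
        (PySem.List.pyGet? registers a).map fun ra =>
        pvSetB registers c (pvArith op3 ra y)
      else none

-- ===== PRECONDITION & SPEC =====
-- Pre_ excludes exactly the inputs on which A raises IndexError: opcodes that read
-- registers[a] (resp. registers[b]) require that index to be in Python range.
def Pre_process (opcode : String) (args : Int × Int × Int) (registers : List Int) : Prop :=
  (opcode ∈ (["addr","addi","mulr","muli","banr","bani","borr","bori","setr","gtri","gtrr","eqri","eqrr"] : List String) →
    PySem.Raise.InRange registers.length args.1) ∧
  (opcode ∈ (["addr","mulr","banr","borr","gtir","gtrr","eqir","eqrr"] : List String) →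
    PySem.Raise.InRange registers.length args.2.1)
instance (opcode : String) (args : Int × Int × Int) (registers : List Int) : Decidable (Pre_process opcode args registers) := by unfold Pre_process; infer_instance
def pvWitness_process : String × (Int × Int × Int) × List Int := ("addr", (0, 1, 2), [3, 4, 5])

def Spec_process (opcode : String) (args : Int × Int × Int) (registers : List Int) (out : Option (List Int)) : Prop := out = process_alt opcode args registers
instance (opcode : String) (args : Int × Int × Int) (registers : List Int) (out : Option (List Int)) : Decidable (Spec_process opcode args registers out) := by unfold Spec_process; infer_instance

-- ===== CLAIM =====
def Claim_equal_process : Prop := ∀ (opcode : String) (args : Int × Int × Int) (registers : List Int), Dom_process opcode args registers → Pre_process opcode args registers → Spec_process opcode args registers (process opcode args registers)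

-- ===== LEMMAS AND PROOFS =====

theorem pvSetB_eq (l : List Int) (i v : Int) : pvSetB l i v = pvSetRegister l i v := rfl

theorem pv_split_str (s : String) (i : Int) (hi : 0 ≤ i) (u v : String)
    (hu : PySem.Str.slice s (some 0) (some i) = u)
    (hv : PySem.Str.slice s (some i) none = v) :
    s = String.ofList (u.toList ++ v.toList) := by
  apply String.toList_inj.mp
  rw [String.toList_ofList, ← congrArg String.toList hu, ← congrArg String.toList hv]
  simp [PySem.Str.slice, PySem.Chars.slice_eq_listSlice, PySem.List.slice_zero_start, PySem.List.slice_to _ hi, PySem.List.slice_from _ hi]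

-- ===== VERDICT =====
theorem process_spec : Claim_equal_process := by
  unfold Claim_equal_process
  intro opcode args registers _ hpre
  obtain ⟨a, b, c⟩ := args
  obtain ⟨hpa, hpb⟩ := hpre
  unfold Spec_process
  by_cases hc0 : opcode = "addr"
  · subst hc0
    have s02 : PySem.Str.slice "addr" (some 0) (some 2) = "ad" := by decide
    have s2n : PySem.Str.slice "addr" (some 2) none = "dr" := by decide
    have s03 : PySem.Str.slice "addr" (some 0) (some 3) = "add" := by decide
    have s3n : PySem.Str.slice "addr" (some 3) none = "r" := by decide
    have hra := hpa (by decide)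
    have hrb := hpb (by decide)
    rcases hA : PySem.List.pyGet? registers a with _ | va
    · exact absurd hra (by rwa [← PySem.List.pyGet?_eq_none_iff])
    rcases hB : PySem.List.pyGet? registers b with _ | vb
    · exact absurd hrb (by rwa [← PySem.List.pyGet?_eq_none_iff])
    simp [process, process_alt, pvSetB_eq, pvArith, hA, hB, s02, s2n, s03, s3n]
  by_cases hc1 : opcode = "addi"
  · subst hc1
    have s02 : PySem.Str.slice "addi" (some 0) (some 2) = "ad" := by decide
    have s2n : PySem.Str.slice "addi" (some 2) none = "di" := by decide
    have s03 : PySem.Str.slice "addi" (some 0) (some 3) = "add" := by decide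
    have s3n : PySem.Str.slice "addi" (some 3) none = "i" := by decide
    have hra := hpa (by decide)
    rcases hA : PySem.List.pyGet? registers a with _ | va
    · exact absurd hra (by rwa [← PySem.List.pyGet?_eq_none_iff])
    simp [process, process_alt, pvSetB_eq, pvArith, hA, s02, s2n, s03, s3n]
  by_cases hc2 : opcode = "mulr"
  · subst hc2
    have s02 : PySem.Str.slice "mulr" (some 0) (some 2) = "mu" := by decide
    have s2n : PySem.Str.slice "mulr" (some 2) none = "lr" := by decide
    have s03 : PySem.Str.slice "mulr" (some 0) (some 3) = "mul" := by decide
    have s3n : PySem.Str.slice "mulr" (some 3) none = "r" := by decide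
    have hra := hpa (by decide)
    have hrb := hpb (by decide)
    rcases hA : PySem.List.pyGet? registers a with _ | va
    · exact absurd hra (by rwa [← PySem.List.pyGet?_eq_none_iff])
    rcases hB : PySem.List.pyGet? registers b with _ | vb
    · exact absurd hrb (by rwa [← PySem.List.pyGet?_eq_none_iff])
    simp [process, process_alt, pvSetB_eq, pvArith, hA, hB, s02, s2n, s03, s3n]
  by_cases hc3 : opcode = "muli"
  · subst hc3
    have s02 : PySem.Str.slice "muli" (some 0) (some 2) = "mu" := by decide
    have s2n : PySem.Str.slice "muli" (some 2) none = "li" := by decide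
    have s03 : PySem.Str.slice "muli" (some 0) (some 3) = "mul" := by decide
    have s3n : PySem.Str.slice "muli" (some 3) none = "i" := by decide
    have hra := hpa (by decide)
    rcases hA : PySem.List.pyGet? registers a with _ | va
    · exact absurd hra (by rwa [← PySem.List.pyGet?_eq_none_iff])
    simp [process, process_alt, pvSetB_eq, pvArith, hA, s02, s2n, s03, s3n]
  by_cases hc4 : opcode = "banr"
  · subst hc4
    have s02 : PySem.Str.slice "banr" (some 0) (some 2) = "ba" := by decide
    have s2n : PySem.Str.slice "banr" (some 2) none = "nr" := by decide
    have s03 : PySem.Str.slice "banr" (some 0) (some 3) = "ban" := by decide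
    have s3n : PySem.Str.slice "banr" (some 3) none = "r" := by decide
    have hra := hpa (by decide)
    have hrb := hpb (by decide)
    rcases hA : PySem.List.pyGet? registers a with _ | va
    · exact absurd hra (by rwa [← PySem.List.pyGet?_eq_none_iff])
    rcases hB : PySem.List.pyGet? registers b with _ | vb
    · exact absurd hrb (by rwa [← PySem.List.pyGet?_eq_none_iff])
    simp [process, process_alt, pvSetB_eq, pvArith, hA, hB, s02, s2n, s03, s3n]
  by_cases hc5 : opcode = "bani"
  · subst hc5
    have s02 : PySem.Str.slice "bani" (some 0) (some 2) = "ba" := by decide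
    have s2n : PySem.Str.slice "bani" (some 2) none = "ni" := by decide
    have s03 : PySem.Str.slice "bani" (some 0) (some 3) = "ban" := by decide
    have s3n : PySem.Str.slice "bani" (some 3) none = "i" := by decide
    have hra := hpa (by decide)
    rcases hA : PySem.List.pyGet? registers a with _ | va
    · exact absurd hra (by rwa [← PySem.List.pyGet?_eq_none_iff])
    simp [process, process_alt, pvSetB_eq, pvArith, hA, s02, s2n, s03, s3n]
  by_cases hc6 : opcode = "borr"
  · subst hc6
    have s02 : PySem.Str.slice "borr" (some 0) (some 2) = "bo" := by decide
    have s2n : PySem.Str.slice "borr" (some 2) none = "rr" := by decide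
    have s03 : PySem.Str.slice "borr" (some 0) (some 3) = "bor" := by decide
    have s3n : PySem.Str.slice "borr" (some 3) none = "r" := by decide
    have hra := hpa (by decide)
    have hrb := hpb (by decide)
    rcases hA : PySem.List.pyGet? registers a with _ | va
    · exact absurd hra (by rwa [← PySem.List.pyGet?_eq_none_iff])
    rcases hB : PySem.List.pyGet? registers b with _ | vb
    · exact absurd hrb (by rwa [← PySem.List.pyGet?_eq_none_iff])
    simp [process, process_alt, pvSetB_eq, pvArith, hA, hB, s02, s2n, s03, s3n]
  by_cases hc7 : opcode = "bori"
  · subst hc7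
    have s02 : PySem.Str.slice "bori" (some 0) (some 2) = "bo" := by decide
    have s2n : PySem.Str.slice "bori" (some 2) none = "ri" := by decide
    have s03 : PySem.Str.slice "bori" (some 0) (some 3) = "bor" := by decide
    have s3n : PySem.Str.slice "bori" (some 3) none = "i" := by decide
    have hra := hpa (by decide)
    rcases hA : PySem.List.pyGet? registers a with _ | va
    · exact absurd hra (by rwa [← PySem.List.pyGet?_eq_none_iff])
    simp [process, process_alt, pvSetB_eq, pvArith, hA, s02, s2n, s03, s3n]
  by_cases hc8 : opcode = "setr"
  · subst hc8
    have hra := hpa (by decide)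
    rcases hA : PySem.List.pyGet? registers a with _ | va
    · exact absurd hra (by rwa [← PySem.List.pyGet?_eq_none_iff])
    simp [process, process_alt, pvSetB_eq, hA]
  by_cases hc9 : opcode = "seti"
  · subst hc9
    simp [process, process_alt, pvSetB_eq]
  by_cases hc10 : opcode = "gtir"
  · subst hc10
    have s02 : PySem.Str.slice "gtir" (some 0) (some 2) = "gt" := by decide
    have s2n : PySem.Str.slice "gtir" (some 2) none = "ir" := by decide
    have hrb := hpb (by decide)
    rcases hB : PySem.List.pyGet? registers b with _ | vb
    · exact absurd hrb (by rwa [← PySem.List.pyGet?_eq_none_iff])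
    simp [process, process_alt, pvSetB_eq, hB, s02, s2n]
  by_cases hc11 : opcode = "gtri"
  · subst hc11
    have s02 : PySem.Str.slice "gtri" (some 0) (some 2) = "gt" := by decide
    have s2n : PySem.Str.slice "gtri" (some 2) none = "ri" := by decide
    have hra := hpa (by decide)
    rcases hA : PySem.List.pyGet? registers a with _ | va
    · exact absurd hra (by rwa [← PySem.List.pyGet?_eq_none_iff])
    simp [process, process_alt, pvSetB_eq, hA, s02, s2n]
  by_cases hc12 : opcode = "gtrr"
  · subst hc12
    have s02 : PySem.Str.slice "gtrr" (some 0) (some 2) = "gt" := by decide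
    have s2n : PySem.Str.slice "gtrr" (some 2) none = "rr" := by decide
    have hra := hpa (by decide)
    have hrb := hpb (by decide)
    rcases hA : PySem.List.pyGet? registers a with _ | va
    · exact absurd hra (by rwa [← PySem.List.pyGet?_eq_none_iff])
    rcases hB : PySem.List.pyGet? registers b with _ | vb
    · exact absurd hrb (by rwa [← PySem.List.pyGet?_eq_none_iff])
    simp [process, process_alt, pvSetB_eq, hA, hB, s02, s2n]
  by_cases hc13 : opcode = "eqir"
  · subst hc13
    have s02 : PySem.Str.slice "eqir" (some 0) (some 2) = "eq" := by decide
    have s2n : PySem.Str.slice "eqir" (some 2) none = "ir" := by decide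
    have hrb := hpb (by decide)
    rcases hB : PySem.List.pyGet? registers b with _ | vb
    · exact absurd hrb (by rwa [← PySem.List.pyGet?_eq_none_iff])
    simp [process, process_alt, pvSetB_eq, hB, s02, s2n]
  by_cases hc14 : opcode = "eqri"
  · subst hc14
    have s02 : PySem.Str.slice "eqri" (some 0) (some 2) = "eq" := by decide
    have s2n : PySem.Str.slice "eqri" (some 2) none = "ri" := by decide
    have hra := hpa (by decide)
    rcases hA : PySem.List.pyGet? registers a with _ | va
    · exact absurd hra (by rwa [← PySem.List.pyGet?_eq_none_iff])
    simp [process, process_alt, pvSetB_eq, hA, s02, s2n]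
  by_cases hc15 : opcode = "eqrr"
  · subst hc15
    have s02 : PySem.Str.slice "eqrr" (some 0) (some 2) = "eq" := by decide
    have s2n : PySem.Str.slice "eqrr" (some 2) none = "rr" := by decide
    have hra := hpa (by decide)
    have hrb := hpb (by decide)
    rcases hA : PySem.List.pyGet? registers a with _ | va
    · exact absurd hra (by rwa [← PySem.List.pyGet?_eq_none_iff])
    rcases hB : PySem.List.pyGet? registers b with _ | vb
    · exact absurd hrb (by rwa [← PySem.List.pyGet?_eq_none_iff])
    simp [process, process_alt, pvSetB_eq, hA, hB, s02, s2n]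
  · -- opcode is none of the sixteen: both sides return none
    have hgt : ¬((PySem.Str.slice opcode (some 0) (some 2) = "gt" ∨ PySem.Str.slice opcode (some 0) (some 2) = "eq")
        ∧ ((PySem.Str.slice opcode (some 2) none = "ir" ∨ PySem.Str.slice opcode (some 2) none = "ri")
            ∨ PySem.Str.slice opcode (some 2) none = "rr")) := by
      rintro ⟨hu, hv⟩
      rcases hu with hu | hu <;> rcases hv with (hv | hv) | hv
      · exact hc10 ((pv_split_str opcode 2 (by norm_num) _ _ hu hv).trans (by decide))
      · exact hc11 ((pv_split_str opcode 2 (by norm_num) _ _ hu hv).trans (by decide))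
      · exact hc12 ((pv_split_str opcode 2 (by norm_num) _ _ hu hv).trans (by decide))
      · exact hc13 ((pv_split_str opcode 2 (by norm_num) _ _ hu hv).trans (by decide))
      · exact hc14 ((pv_split_str opcode 2 (by norm_num) _ _ hu hv).trans (by decide))
      · exact hc15 ((pv_split_str opcode 2 (by norm_num) _ _ hu hv).trans (by decide))
    have har : ¬((((PySem.Str.slice opcode (some 0) (some 3) = "add" ∨ PySem.Str.slice opcode (some 0) (some 3) = "mul")
            ∨ PySem.Str.slice opcode (some 0) (some 3) = "ban") ∨ PySem.Str.slice opcode (some 0) (some 3) = "bor")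
        ∧ (PySem.Str.slice opcode (some 3) none = "r" ∨ PySem.Str.slice opcode (some 3) none = "i")) := by
      rintro ⟨hu, hv⟩
      rcases hu with ((hu | hu) | hu) | hu <;> rcases hv with hv | hv
      · exact hc0 ((pv_split_str opcode 3 (by norm_num) _ _ hu hv).trans (by decide))
      · exact hc1 ((pv_split_str opcode 3 (by norm_num) _ _ hu hv).trans (by decide))
      · exact hc2 ((pv_split_str opcode 3 (by norm_num) _ _ hu hv).trans (by decide))
      · exact hc3 ((pv_split_str opcode 3 (by norm_num) _ _ hu hv).trans (by decide))
      · exact hc4 ((pv_split_str opcode 3 (by norm_num) _ _ hu hv).trans (by decide))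
      · exact hc5 ((pv_split_str opcode 3 (by norm_num) _ _ hu hv).trans (by decide))
      · exact hc6 ((pv_split_str opcode 3 (by norm_num) _ _ hu hv).trans (by decide))
      · exact hc7 ((pv_split_str opcode 3 (by norm_num) _ _ hu hv).trans (by decide))
    simp [process, process_alt, hc0, hc1, hc2, hc3, hc4, hc5, hc6, hc7, hc8, hc9,
      hc10, hc11, hc12, hc13, hc14, hc15, hgt, har]
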